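-- pv_equiv track=rewrite | github.com/5minho/Codility | lesson_12/CommonPrimeDivisors.py | equal_prime_factor
-- ===== SOURCE A (Python) =====
-- def gcd(n, m):
--     mod = n % m
--     return gcd(m, mod) if mod != 0 else m
--
-- def equal_prime_factor(n, m):
--     n_m_gcd = gcd(n, m)
--     for q in (n, m):
--         while q != 1:
--             n_m_q_gcd = gcd(q, n_m_gcd)
--             if n_m_q_gcd == 1:
--                 return False
--             q //= n_m_q_gcd
--     return True
-- ===== SOURCE B (Python) =====
-- def prime_factors(q):
--     s = set()
--     d = 2
--     while d * d <= q:
--         while q % d == 0: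
--             s.add(d)
--             q //= d
--         d += 1
--     if q > 1:
--         s.add(q)
--     return s
--
-- def equal_prime_factor(n, m):
--     return prime_factors(n) == prime_factors(m)
-- ===== Notes on version B (the rewrite author's own statement) =====
-- stated objective: alternative
-- what changed: B builds the explicit set of prime factors of each argument by trial division and compares the two sets, instead of A's recursive-gcd stripping loop that repeatedly divides each argument by gcd(q, gcd(n,m)).
-- outside the precondition, e.g. on equal_prime_factor(-6, 2): A returns False, B returns False; on equal_prime_factor(-6, 1): A returns False, B returns True; on equal_prime_factor(-6, -6): A returns True, B returns True
import Mathlib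
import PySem

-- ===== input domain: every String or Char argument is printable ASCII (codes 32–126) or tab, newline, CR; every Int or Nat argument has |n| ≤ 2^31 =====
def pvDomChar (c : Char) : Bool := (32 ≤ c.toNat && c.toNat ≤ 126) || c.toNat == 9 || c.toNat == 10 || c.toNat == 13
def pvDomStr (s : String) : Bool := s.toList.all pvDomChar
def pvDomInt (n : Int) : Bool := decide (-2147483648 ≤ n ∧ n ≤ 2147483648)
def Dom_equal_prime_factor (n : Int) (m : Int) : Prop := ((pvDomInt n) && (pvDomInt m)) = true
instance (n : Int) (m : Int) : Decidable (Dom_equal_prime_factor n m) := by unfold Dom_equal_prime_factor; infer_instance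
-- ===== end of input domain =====

-- B builds the explicit set of prime factors of each argument by trial division and compares the
-- two sets, instead of A's gcd-stripping loop (objective: alternative algorithm, similar cost).


-- ===== PORT A =====
-- gcd(n, m): 'mod = n % m; return gcd(m, mod) if mod != 0 else m', transliterated with a fuel
-- bound that only makes the recursion total: |m| + 1 calls always suffice when m ≠ 0 (each
-- recursive call strictly shrinks |m|), so fuel exhaustion (0) is unreachable there.  At m = 0
-- Python raises ZeroDivisionError — outside Pre_ — and the 0 returned there is junk.
def gcdF : Nat → Int → Int → Int
  | 0, _, _ => 0
  | fuel + 1, n, m =>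
    if m = 0 then 0
    else
      let md := PySem.Int.mod n m
      if md ≠ 0 then gcdF fuel m md else m

-- the 'while q != 1' loop of A: d = gcd(q, gcd(n, m)); if d == 1: return False; q //= d.
-- Fuel |q| + 1 suffices from any state with q ≥ 1 (q strictly decreases per iteration); on
-- states with q ≤ 0 Python never leaves the loop (unreachable under Pre_) and the fuel-out
-- value false is junk.
def stripF : Nat → Int → Int → Bool
  | 0, _, _ => false
  | fuel + 1, q, g =>
    if q = 1 then true
    else
      let d := gcdF (g.natAbs + 1) q g
      if d = 1 then false
      else stripF fuel (PySem.Int.floordiv q d) g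

-- 'for q in (n, m)' unrolled into the two successive loop runs
def equal_prime_factor (n : Int) (m : Int) : Bool :=
  let g := gcdF (m.natAbs + 1) n m
  if stripF (n.natAbs + 1) n g then stripF (m.natAbs + 1) m g else false

-- ===== PORT B =====
-- inner 'while q % d == 0: s.add(d); q //= d' of Source B's prime_factors; fuel |q| + 1 is enough
-- from every state the outer loop reaches (q ≥ 1, d ≥ 2: q strictly shrinks per division).
def divOutF : Nat → PySem.Set Int → Int → Int → PySem.Set Int × Int
  | 0, s, q, _ => (s, q)
  | fuel + 1, s, q, d =>
    if PySem.Int.mod q d = 0 then divOutF fuel (PySem.Set.add s d) (PySem.Int.floordiv q d) d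
    else (s, q)

-- outer 'while d * d <= q' loop of Source B's prime_factors; returns (s, q) at exit.  Fuel
-- |q| + 1 covers every run from d = 2 (d grows past d * d ≤ q after at most |q| - 1 steps).
def pfLoopF : Nat → PySem.Set Int → Int → Int → PySem.Set Int × Int
  | 0, s, q, _ => (s, q)
  | fuel + 1, s, q, d =>
    if d * d ≤ q then
      let p := divOutF (q.natAbs + 1) s q d
      pfLoopF fuel p.1 p.2 (d + 1)
    else (s, q)

def prime_factors (q : Int) : PySem.Set Int :=
  let p := pfLoopF (q.natAbs + 1) PySem.Set.empty q 2
  if p.2 > 1 then PySem.Set.add p.1 p.2 else p.1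

def equal_prime_factor_alt (n : Int) (m : Int) : Bool :=
  PySem.Set.equal (prime_factors n) (prime_factors m)

-- ===== PRECONDITION & SPEC =====
-- Pre_ keeps the positive inputs (the lesson's stated domain).  Outside it A raises
-- ZeroDivisionError (m = 0), never terminates (e.g. at (0, 2) or (2, -1)), and where it does
-- return on nonpositive input its value is an artefact of floor-mod gcd on negatives.
def Pre_equal_prime_factor (n : Int) (m : Int) : Prop := 1 ≤ n ∧ 1 ≤ m
instance (n : Int) (m : Int) : Decidable (Pre_equal_prime_factor n m) := by unfold Pre_equal_prime_factor; infer_instance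
def pvWitness_equal_prime_factor : Int × Int := (12, 6)

def Spec_equal_prime_factor (n : Int) (m : Int) (out : Bool) : Prop := out = equal_prime_factor_alt n m
instance (n : Int) (m : Int) (out : Bool) : Decidable (Spec_equal_prime_factor n m out) := by unfold Spec_equal_prime_factor; infer_instance

-- ===== CLAIM (what is proved, stated in full; the proofs are below) =====
def Claim_equal_equal_prime_factor : Prop := ∀ (n : Int) (m : Int), Dom_equal_prime_factor n m → Pre_equal_prime_factor n m → Spec_equal_prime_factor n m (equal_prime_factor n m)

-- ===== LEMMAS AND PROOFS =====

theorem gcdF_natCast : ∀ (fuel : Nat) (a b : ℕ), 1 ≤ b → b ≤ fuel →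
    gcdF fuel (a : Int) (b : Int) = ((Nat.gcd a b : ℕ) : Int) := by
  intro fuel
  induction fuel with
  | zero => intro a b hb hf; omega
  | succ k IH =>
    intro a b hb hf
    have hb0 : ((b : Int)) ≠ 0 := by exact_mod_cast Nat.one_le_iff_ne_zero.mp hb
    rw [gcdF]
    rw [if_neg hb0]
    have hmd : PySem.Int.mod (a : Int) (b : Int) = ((a % b : ℕ) : Int) := by
      simp [PySem.Int.mod_natCast a b]
    by_cases hz : a % b = 0
    · have hnz : ¬ (PySem.Int.mod (a : Int) (b : Int) ≠ 0) := by simp [hmd, hz]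
      rw [if_neg hnz]
      rw [Nat.gcd_eq_right (Nat.dvd_of_mod_eq_zero hz)]
    · have hz' : PySem.Int.mod (a : Int) (b : Int) ≠ 0 := by
        simp only [hmd]
        exact_mod_cast hz
      rw [if_pos hz']
      have hlt : a % b < b := Nat.mod_lt _ (by omega)
      have h1 : 1 ≤ a % b := Nat.one_le_iff_ne_zero.mpr hz
      rw [hmd, IH b (a % b) h1 (by omega)]
      rw [Nat.gcd_comm b (a % b), ← Nat.gcd_rec b a, Nat.gcd_comm b a]

theorem gcdA_pos_eq (fuel : Nat) (q g : Int) (hq : 1 ≤ q) (hg : 1 ≤ g) (hf : g.natAbs ≤ fuel) :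
    gcdF fuel q g = ((Nat.gcd q.toNat g.toNat : ℕ) : Int) := by
  have h1 : ((q.toNat : ℕ) : Int) = q := Int.toNat_of_nonneg (by omega)
  have h2 : ((g.toNat : ℕ) : Int) = g := Int.toNat_of_nonneg (by omega)
  rw [← h1, ← h2]
  exact gcdF_natCast fuel q.toNat g.toNat (by omega) (by omega)

theorem stripF_iff : ∀ (fuel : Nat) (q g : Int), q.natAbs < fuel → 1 ≤ q → 1 ≤ g →
    (stripF fuel q g = true ↔ ∀ p : ℕ, p.Prime → (p : Int) ∣ q → (p : Int) ∣ g) := by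
  intro fuel
  induction fuel with
  | zero => intro q g hf hq hg; omega
  | succ k IH =>
    intro q g hf hq hg
    rw [stripF]
    by_cases hq1 : q = 1
    · rw [if_pos hq1, hq1]
      simp only [true_iff]
      intro p hp hpd
      exfalso
      have h1 : ((p : ℕ) : Int) = 1 := Int.eq_one_of_dvd_one (by positivity) hpd
      have : p = 1 := by exact_mod_cast h1
      exact hp.one_lt.ne' this
    rw [if_neg hq1]
    have hg1 : gcdF (g.natAbs + 1) q g = ((Nat.gcd q.toNat g.toNat : ℕ) : Int) :=
      gcdA_pos_eq _ q g hq hg (by omega)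
    by_cases hd1 : gcdF (g.natAbs + 1) q g = 1
    · rw [if_pos hd1]
      simp only [Bool.false_eq_true, false_iff]
      push Not
      have hx2 : 2 ≤ q := by omega
      have hgcd1 : Nat.gcd q.toNat g.toNat = 1 := by
        have h2 := hg1 ▸ hd1; exact_mod_cast h2
      obtain ⟨p, hp, hpd⟩ := Nat.exists_prime_and_dvd (n := q.toNat) (by omega)
      refine ⟨p, hp, ?_, ?_⟩
      · have h3 : ((p : ℕ) : Int) ∣ ((q.toNat : ℕ) : Int) := Int.ofNat_dvd.mpr hpd
        rwa [Int.toNat_of_nonneg (by omega : (0:Int) ≤ q)] at h3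
      · intro hpg
        have hpg' : p ∣ g.toNat := by
          rw [← Int.ofNat_dvd]
          rwa [Int.toNat_of_nonneg (by omega : (0:Int) ≤ g)]
        have h4 : p ∣ Nat.gcd q.toNat g.toNat := Nat.dvd_gcd hpd hpg'
        rw [hgcd1] at h4
        exact hp.one_lt.ne' (Nat.eq_one_of_dvd_one h4)
    · rw [if_neg hd1]
      have hgpos : 0 < Nat.gcd q.toNat g.toNat := Nat.gcd_pos_of_pos_left _ (by omega)
      have hd : 2 ≤ gcdF (g.natAbs + 1) q g := by
        rw [hg1]
        have h9 : Nat.gcd q.toNat g.toNat ≠ 1 := by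
          intro h; apply hd1; rw [hg1, h]; rfl
        omega
      set d := gcdF (g.natAbs + 1) q g with hdDef
      have hddq : d ∣ q := by
        rw [hg1]
        have h5 : ((Nat.gcd q.toNat g.toNat : ℕ) : Int) ∣ ((q.toNat : ℕ) : Int) :=
          Int.ofNat_dvd.mpr (Nat.gcd_dvd_left _ _)
        rwa [Int.toNat_of_nonneg (by omega : (0:Int) ≤ q)] at h5
      have hddg : d ∣ g := by
        rw [hg1]
        have h6 : ((Nat.gcd q.toNat g.toNat : ℕ) : Int) ∣ ((g.toNat : ℕ) : Int) :=
          Int.ofNat_dvd.mpr (Nat.gcd_dvd_right _ _)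
        rwa [Int.toNat_of_nonneg (by omega : (0:Int) ≤ g)] at h6
      have hdpos : (0:Int) < d := by omega
      have hfd : PySem.Int.floordiv q d = q / d := PySem.Int.floordiv_eq_ediv_of_pos hdpos
      have hxfac : d * (q / d) = q := Int.mul_ediv_cancel' hddq
      have hq' : 1 ≤ PySem.Int.floordiv q d := by
        rw [PySem.Int.le_floordiv_iff_mul_le hdpos]
        have := Int.le_of_dvd (by omega) hddq
        omega
      have hlt : PySem.Int.floordiv q d < q := by
        rw [PySem.Int.floordiv_lt_iff_lt_mul hdpos]
        nlinarith
      rw [IH (PySem.Int.floordiv q d) g (by omega) hq' hg]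
      constructor
      · intro h p hp hpx
        by_cases hpd : (p : Int) ∣ d
        · exact dvd_trans hpd hddg
        · have hpprime : Prime (p : Int) := Nat.prime_iff_prime_int.mp hp
          have h7 : (p : Int) ∣ d * (q / d) := by rw [hxfac]; exact hpx
          rcases (hpprime.dvd_mul).mp h7 with h8 | h8
          · exact absurd h8 hpd
          · exact h p hp (by rwa [hfd])
      · intro h p hp hpx'
        refine h p hp ?_
        rw [hfd] at hpx'
        have hdvdx : q / d ∣ q := ⟨d, (Int.ediv_mul_cancel hddq).symm⟩
        exact dvd_trans hpx' hdvdx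

theorem divOut_le : ∀ (fuel : Nat) (s : PySem.Set Int) (q d : Int), q.natAbs ≤ fuel →
    2 ≤ d → 1 ≤ q →
    (divOutF fuel s q d).2 ≤ q ∧ 1 ≤ (divOutF fuel s q d).2 := by
  intro fuel
  induction fuel with
  | zero => intro s q d hf hd hq; rw [divOutF]; omega
  | succ k IH =>
    intro s q d hf hd hq
    rw [divOutF]
    by_cases hm : PySem.Int.mod q d = 0
    · rw [if_pos hm]
      have hdpos : (0:Int) < d := by omega
      have hdvd : d ∣ q := (PySem.Int.mod_eq_zero_iff_dvd q d).mp hm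
      have hq' : 1 ≤ PySem.Int.floordiv q d := by
        rw [PySem.Int.le_floordiv_iff_mul_le hdpos]
        have := Int.le_of_dvd (by omega) hdvd
        omega
      have hlt : PySem.Int.floordiv q d < q := by
        rw [PySem.Int.floordiv_lt_iff_lt_mul hdpos]
        nlinarith
      have := IH (PySem.Set.add s d) (PySem.Int.floordiv q d) d (by omega) hd hq'
      omega
    · rw [if_neg hm]
      omega

theorem divOut_spec : ∀ (fuel : Nat) (s : PySem.Set Int) (q d : Int), q.natAbs ≤ fuel →
    2 ≤ d → d.toNat.Prime → 1 ≤ q →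
    1 ≤ (divOutF fuel s q d).2 ∧ (divOutF fuel s q d).2 ∣ q ∧ ¬ d ∣ (divOutF fuel s q d).2 ∧
    (∀ p : ℕ, p.Prime → (p : Int) ≠ d → ((p : Int) ∣ (divOutF fuel s q d).2 ↔ (p : Int) ∣ q)) ∧
    (∀ x : Int, x ∈ (divOutF fuel s q d).1 ↔ x ∈ s ∨ (d ∣ q ∧ x = d)) := by
  intro fuel
  induction fuel with
  | zero => intro s q d hf hd hdp hq; omega
  | succ k IH =>
    intro s q d hf hd hdp hq
    rw [divOutF]
    by_cases hm : PySem.Int.mod q d = 0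
    · rw [if_pos hm]
      have hdpos : (0:Int) < d := by omega
      have hdvd : d ∣ q := (PySem.Int.mod_eq_zero_iff_dvd q d).mp hm
      have hfd : PySem.Int.floordiv q d = q / d := PySem.Int.floordiv_eq_ediv_of_pos hdpos
      have hq' : 1 ≤ PySem.Int.floordiv q d := by
        rw [PySem.Int.le_floordiv_iff_mul_le hdpos]
        have := Int.le_of_dvd (by omega) hdvd
        omega
      have hlt : PySem.Int.floordiv q d < q := by
        rw [PySem.Int.floordiv_lt_iff_lt_mul hdpos]
        nlinarith
      have hfac : d * (q / d) = q := Int.mul_ediv_cancel' hdvd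
      obtain ⟨ih1, ih2, ih3, ih4, ih5⟩ :=
        IH (PySem.Set.add s d) (PySem.Int.floordiv q d) d (by omega) hd hdp hq'
      have hsub : PySem.Int.floordiv q d ∣ q := by
        rw [hfd]; exact ⟨d, (Int.ediv_mul_cancel hdvd).symm⟩
      refine ⟨ih1, dvd_trans ih2 hsub, ih3, ?_, ?_⟩
      · intro p hp hpne
        rw [ih4 p hp hpne]
        have hpprime : Prime (p : Int) := Nat.prime_iff_prime_int.mp hp
        constructor
        · intro h; exact dvd_trans h hsub
        · intro h
          have h2 : (p : Int) ∣ d * (q / d) := by rw [hfac]; exact h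
          rcases hpprime.dvd_mul.mp h2 with h3 | h3
          · exfalso
            have hpn : p ∣ d.toNat := by
              rw [← Int.ofNat_dvd]
              rwa [Int.toNat_of_nonneg (by omega : (0:Int) ≤ d)]
            have := (Nat.prime_dvd_prime_iff_eq hp hdp).mp hpn
            apply hpne
            rw [this, Int.toNat_of_nonneg (by omega : (0:Int) ≤ d)]
          · rwa [hfd]
      · intro x
        rw [ih5 x]
        simp only [PySem.Set.mem_add]
        constructor
        · rintro (⟨h | h⟩ | ⟨h1, h2⟩)
          · exact Or.inl h
          · exact Or.inr ⟨hdvd, h⟩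
          · exact Or.inr ⟨hdvd, h2⟩
        · rintro (h | ⟨h1, h2⟩)
          · exact Or.inl (Or.inl h)
          · exact Or.inl (Or.inr h2)
    · rw [if_neg hm]
      have hnd : ¬ d ∣ q := fun h => hm ((PySem.Int.mod_eq_zero_iff_dvd q d).mpr h)
      refine ⟨hq, dvd_refl q, hnd, fun p hp hpne => Iff.rfl, fun x => ?_⟩
      simp [hnd]

theorem divOutF_of_not_dvd (fuel : Nat) (s : PySem.Set Int) (q d : Int) (h : ¬ d ∣ q) :
    divOutF (fuel + 1) s q d = (s, q) := by
  rw [divOutF, if_neg (fun hm => h ((PySem.Int.mod_eq_zero_iff_dvd q d).mp hm))]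

-- a trial divisor that divides q is prime, since all smaller candidates were stripped
theorem trial_divisor_prime (q d : Int) (hq : 1 ≤ q) (hd : 2 ≤ d) (hdq : d ∣ q)
    (hsmall : ∀ e : Int, 2 ≤ e → e < d → ¬ e ∣ q) : d.toNat.Prime := by
  by_contra hnp
  have hd2 : 2 ≤ d.toNat := by omega
  obtain ⟨m, hm1, hm2, hm3⟩ := Nat.exists_dvd_of_not_prime2 hd2 hnp
  have hmd : (m : Int) ∣ d := by
    have := Int.ofNat_dvd.mpr hm1
    rwa [Int.toNat_of_nonneg (by omega : (0:Int) ≤ d)] at this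
  exact hsmall (m : Int) (by exact_mod_cast hm2)
    (by have : (m : Int) < (d.toNat : Int) := by exact_mod_cast hm3
        rwa [Int.toNat_of_nonneg (by omega : (0:Int) ≤ d)] at this)
    (dvd_trans hmd hdq)

theorem pfLoop_spec : ∀ (fuel : Nat) (s : PySem.Set Int) (q d : Int),
    (q + 1 - d).toNat ≤ fuel → 2 ≤ d → 1 ≤ q →
    (∀ e : Int, 2 ≤ e → e < d → ¬ e ∣ q) →
    1 ≤ (pfLoopF fuel s q d).2 ∧ (pfLoopF fuel s q d).2 ∣ q ∧
    (∀ e : Int, 2 ≤ e → e ∣ (pfLoopF fuel s q d).2 → ¬ (e * e ≤ (pfLoopF fuel s q d).2)) ∧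
    (∀ x : Int, x ∈ (pfLoopF fuel s q d).1 ↔ x ∈ s ∨
      ∃ p : ℕ, p.Prime ∧ (p : Int) ∣ q ∧ ¬ (p : Int) ∣ (pfLoopF fuel s q d).2 ∧ x = (p : Int)) := by
  intro fuel
  induction fuel with
  | zero =>
    -- fuel 0 is only reached with d > q, where the loop test d * d ≤ q already fails
    intro s q d hf hd hq hsmall
    rw [pfLoopF]
    have hdq : q < d := by omega
    refine ⟨hq, dvd_refl q, ?_, ?_⟩
    · intro e he1 he2 he3
      rcases lt_or_ge e d with h | h
      · exact hsmall e he1 h he2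
      · have := Int.le_of_dvd (by omega) he2
        omega
    · intro x
      simp only [iff_self_or]
      rintro ⟨p', hp', h1, h2, hx⟩
      exact absurd h1 h2
  | succ k IH =>
    intro s q d hf hd hq hsmall
    rw [pfLoopF]
    by_cases hc : d * d ≤ q
    · rw [if_pos hc]
      have hdq : d ≤ q := le_trans (by nlinarith) hc
      by_cases hdvd : d ∣ q
      · have hdp : d.toNat.Prime := trial_divisor_prime q d hq hd hdvd hsmall
        obtain ⟨ih1, ih2, ih3, ih4, ih5⟩ :=
          divOut_spec (q.natAbs + 1) s q d (by omega) hd hdp hq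
        have hle := divOut_le (q.natAbs + 1) s q d (by omega) hd hq
        have hsmall' : ∀ e : Int, 2 ≤ e → e < d + 1 →
            ¬ e ∣ (divOutF (q.natAbs + 1) s q d).2 := by
          intro e he1 he2 hediv
          rcases lt_or_ge e d with h | h
          · exact hsmall e he1 h (dvd_trans hediv ih2)
          · have : e = d := by omega
            rw [this] at hediv; exact ih3 hediv
        obtain ⟨jh1, jh2, jh3, jh4⟩ :=
          IH (divOutF (q.natAbs + 1) s q d).1 (divOutF (q.natAbs + 1) s q d).2 (d + 1)
            (by omega) (by omega) ih1 hsmall'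
        refine ⟨jh1, dvd_trans jh2 ih2, jh3, ?_⟩
        intro x
        rw [jh4 x, ih5 x]
        have hdnat : ((d.toNat : ℕ) : Int) = d := Int.toNat_of_nonneg (by omega)
        constructor
        · rintro ((h | ⟨h1, h2⟩) | ⟨p', hp', hp'q, hp'r, hx⟩)
          · exact Or.inl h
          · refine Or.inr ⟨d.toNat, hdp, by rw [hdnat]; exact hdvd, ?_, by rw [hdnat, h2]⟩
            rw [hdnat]
            intro hdr
            exact ih3 (dvd_trans hdr jh2)
          · exact Or.inr ⟨p', hp', dvd_trans hp'q ih2, hp'r, hx⟩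
        · rintro (h | ⟨p', hp', hp'q, hp'r, hx⟩)
          · exact Or.inl (Or.inl h)
          · by_cases hpd : (p' : Int) = d
            · exact Or.inl (Or.inr ⟨hdvd, by rw [hx, hpd]⟩)
            · exact Or.inr ⟨p', hp', (ih4 p' hp' hpd).mpr hp'q, hp'r, hx⟩
      · have hDE : divOutF (q.natAbs + 1) s q d = (s, q) := by
          cases hn : q.natAbs + 1 with
          | zero => omega
          | succ j => rw [← hn]; rw [hn, divOutF_of_not_dvd j s q d hdvd]
        rw [hDE]
        have hsmall' : ∀ e : Int, 2 ≤ e → e < d + 1 → ¬ e ∣ q := by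
          intro e he1 he2
          rcases lt_or_ge e d with h | h
          · exact hsmall e he1 h
          · have : e = d := by omega
            rw [this]; exact hdvd
        exact IH s q (d + 1) (by omega) (by omega) hq hsmall'
    · rw [if_neg hc]
      refine ⟨hq, dvd_refl q, ?_, ?_⟩
      · intro e he1 he2 he3
        rcases lt_or_ge e d with h | h
        · exact hsmall e he1 h he2
        · apply hc
          calc d * d ≤ e * e := by nlinarith
            _ ≤ q := he3
      · intro x
        simp only [iff_self_or]
        rintro ⟨p', hp', h1, h2, hx⟩
        exact absurd h1 h2

theorem prime_factors_spec (q : Int) (hq : 1 ≤ q) (x : Int) :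
    x ∈ prime_factors q ↔ ∃ p : ℕ, p.Prime ∧ (p : Int) ∣ q ∧ x = (p : Int) := by
  obtain ⟨h1, h2, h3, h4⟩ := pfLoop_spec (q.natAbs + 1) PySem.Set.empty q 2 (by omega)
    (by omega) hq (by intro e he1 he2; omega)
  rw [prime_factors]
  set r := (pfLoopF (q.natAbs + 1) PySem.Set.empty q 2).2 with hr
  by_cases hgt : r > 1
  · have hrnat : ((r.toNat : ℕ) : Int) = r := Int.toNat_of_nonneg (by omega)
    have hrp : r.toNat.Prime := by
      rw [Nat.prime_def_le_sqrt]
      refine ⟨by omega, ?_⟩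
      intro e he1 he2 hediv
      have hee : e * e ≤ r.toNat := Nat.le_sqrt.mp he2
      refine h3 (e : Int) (by exact_mod_cast he1) ?_ ?_
      · have := Int.ofNat_dvd.mpr hediv
        rwa [hrnat] at this
      · have : ((e * e : ℕ) : Int) ≤ ((r.toNat : ℕ) : Int) := by exact_mod_cast hee
        rw [hrnat] at this
        exact_mod_cast this
    simp only [if_pos hgt, PySem.Set.mem_add, h4 x]
    constructor
    · rintro ((h | ⟨p', hp', hpq, hpr, hx⟩) | hxr)
      · simp [PySem.Set.empty] at h
      · exact ⟨p', hp', hpq, hx⟩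
      · exact ⟨r.toNat, hrp, by rw [hrnat]; exact h2, by rw [hrnat, hxr]⟩
    · rintro ⟨p0, hp0, hp0q, hx⟩
      by_cases hdr : (p0 : Int) ∣ r
      · have hp0r : p0 ∣ r.toNat := by rw [← Int.ofNat_dvd]; rwa [hrnat]
        have : p0 = r.toNat := (Nat.prime_dvd_prime_iff_eq hp0 hrp).mp hp0r
        exact Or.inr (by rw [hx, this, hrnat])
      · exact Or.inl (Or.inr ⟨p0, hp0, hp0q, hdr, hx⟩)
  · have hr1 : r = 1 := by omega
    simp only [if_neg hgt, h4 x]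
    constructor
    · rintro (h | ⟨p', hp', hpq, hpr, hx⟩)
      · simp [PySem.Set.empty] at h
      · exact ⟨p', hp', hpq, hx⟩
    · rintro ⟨p0, hp0, hp0q, hx⟩
      refine Or.inr ⟨p0, hp0, hp0q, ?_, hx⟩
      rw [hr1]
      intro hdvd
      have h5 : ((p0 : ℕ) : Int) = 1 := Int.eq_one_of_dvd_one (by positivity) hdvd
      have : p0 = 1 := by exact_mod_cast h5
      exact hp0.one_lt.ne' this

theorem altB_iff (n m : Int) (hn : 1 ≤ n) (hm : 1 ≤ m) :
    (equal_prime_factor_alt n m = true ↔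
      ∀ p : ℕ, p.Prime → ((p : Int) ∣ n ↔ (p : Int) ∣ m)) := by
  rw [equal_prime_factor_alt, PySem.Set.equal_iff]
  constructor
  · intro h p hp
    constructor
    · intro hpn
      have h0 : ((p : ℕ) : Int) ∈ prime_factors n := (prime_factors_spec n hn _).mpr ⟨p, hp, hpn, rfl⟩
      obtain ⟨p', hp', hp'm, hx⟩ := (prime_factors_spec m hm _).mp ((h _).mp h0)
      have : p' = p := by exact_mod_cast hx.symm
      rwa [← this]
    · intro hpm
      have h0 : ((p : ℕ) : Int) ∈ prime_factors m := (prime_factors_spec m hm _).mpr ⟨p, hp, hpm, rfl⟩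
      obtain ⟨p', hp', hp'n, hx⟩ := (prime_factors_spec n hn _).mp ((h _).mpr h0)
      have : p' = p := by exact_mod_cast hx.symm
      rwa [← this]
  · intro h x
    rw [prime_factors_spec n hn x, prime_factors_spec m hm x]
    constructor
    · rintro ⟨p, hp, hpn, hx⟩; exact ⟨p, hp, (h p hp).mp hpn, hx⟩
    · rintro ⟨p, hp, hpm, hx⟩; exact ⟨p, hp, (h p hp).mpr hpm, hx⟩

theorem portA_iff (n m : Int) (hn : 1 ≤ n) (hm : 1 ≤ m) :
    (equal_prime_factor n m = true ↔
      ∀ p : ℕ, p.Prime → ((p : Int) ∣ n ↔ (p : Int) ∣ m)) := by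
  have hgpos : 0 < Nat.gcd n.toNat m.toNat := Nat.gcd_pos_of_pos_left _ (by omega)
  have hg : gcdF (m.natAbs + 1) n m = ((Nat.gcd n.toNat m.toNat : ℕ) : Int) :=
    gcdA_pos_eq _ n m hn hm (by omega)
  have hg1 : 1 ≤ gcdF (m.natAbs + 1) n m := by rw [hg]; exact_mod_cast hgpos
  have hdvdg : ∀ p : ℕ, p.Prime →
      ((p : Int) ∣ gcdF (m.natAbs + 1) n m ↔ ((p : Int) ∣ n ∧ (p : Int) ∣ m)) := by
    intro p hp
    rw [hg, Int.ofNat_dvd, Nat.dvd_gcd_iff]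
    have e1 : ((n.toNat : ℕ) : Int) = n := Int.toNat_of_nonneg (by omega)
    have e2 : ((m.toNat : ℕ) : Int) = m := Int.toNat_of_nonneg (by omega)
    rw [← e1, ← e2, Int.ofNat_dvd, Int.ofNat_dvd]
    simp only [Int.toNat_natCast]
  rw [equal_prime_factor]
  have hsplit : (if stripF (n.natAbs + 1) n (gcdF (m.natAbs + 1) n m) then
        stripF (m.natAbs + 1) m (gcdF (m.natAbs + 1) n m) else false) = true ↔
      (stripF (n.natAbs + 1) n (gcdF (m.natAbs + 1) n m) = true ∧
        stripF (m.natAbs + 1) m (gcdF (m.natAbs + 1) n m) = true) := by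
    cases hs : stripF (n.natAbs + 1) n (gcdF (m.natAbs + 1) n m) <;> simp
  rw [hsplit, stripF_iff (n.natAbs + 1) n _ (by omega) hn hg1,
    stripF_iff (m.natAbs + 1) m _ (by omega) hm hg1]
  constructor
  · rintro ⟨h1, h2⟩ p hp
    constructor
    · intro hpn
      exact ((hdvdg p hp).mp (h1 p hp hpn)).2
    · intro hpm
      exact ((hdvdg p hp).mp (h2 p hp hpm)).1
  · intro h
    constructor
    · intro p hp hpn
      exact (hdvdg p hp).mpr ⟨hpn, (h p hp).mp hpn⟩
    · intro p hp hpm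
      exact (hdvdg p hp).mpr ⟨(h p hp).mpr hpm, hpm⟩

theorem equal_prime_factor_main (n m : Int) (hn : 1 ≤ n) (hm : 1 ≤ m) :
    equal_prime_factor n m = equal_prime_factor_alt n m := by
  rw [Bool.eq_iff_iff, portA_iff n m hn hm, altB_iff n m hn hm]

-- ===== VERDICT (by name: the statement is the Claim_ definition above) =====
theorem equal_prime_factor_spec : Claim_equal_equal_prime_factor := by
  intro n m _ hpre
  exact equal_prime_factor_main n m hpre.1 hpre.2
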